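/- GENERATED by farm/mkstatement.py from design/units.tsv (unit `flush_packet`) and the Specs of Vorbis/Spec/*.lean — do not edit.
   THE STATEMENT of the proof unit `flush_packet`: the function `flush_packet` (8 instructions) satisfies its contract,
   given the contracts of its callees. What the names mean: Vorbis/Spec/Basic.lean. The theorem to prove:
   `theorem flush_packet_ok : Vorbis.Spec.flush_packet.Statement`. -/
import Vorbis.Spec.Reader
namespace Vorbis.Spec.flush_packet
open X86 X86.User Asan

/-- The statement of unit `flush_packet`. -/
def Statement : Prop :=
  ∀ (Lay : Layout) (_hLay : Lay.hi = 0x1000000) (μ : Microarch) (_hμ : UserX.MicroOK μ) (u₀ : State)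
    (_hcode : HasCodeNat Lay u₀ Vorbis.L.flush_packet.entry Vorbis.Code.code_flush_packet.nat Vorbis.L.flush_packet.size)
    (_h_get8_packet_raw : ∀ (others : List Obj) (frames : List (Nat × FrameLayout)) (Blk : Block → Prop) (len : Nat), Calls Lay μ Vorbis.WayInv (Vorbis.conv u₀) Vorbis.L.get8_packet_raw.entry (Vorbis.Spec.get8_packet_raw.spec others frames Blk len)),
    ∀ (others : List Obj) (frames : List (Nat × FrameLayout)) (Blk : Block → Prop) (len : Nat), Calls Lay μ Vorbis.WayInv (Vorbis.conv u₀) Vorbis.L.flush_packet.entry (Vorbis.Spec.flush_packet.spec others frames Blk len)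

end Vorbis.Spec.flush_packet
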